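-- pv_equiv track=rewrite | github.com/kelvinblaser/EulerProject | Euler872.py | infinite_tree_path
-- ===== SOURCE A (Python) =====
-- from typing import Generator
--
-- def infinite_tree_path(k: int) -> Generator[int, None, None]:
--     yield 0
--     suffix, pow2 = 0, 1
--     while k:
--         bit = k % 2
--         suffix += pow2 * bit
--         if bit:
--             yield suffix
--         k //= 2
--         pow2 *= 2
-- ===== SOURCE B (Python) =====
-- def infinite_tree_path(k):
--     yield 0
--     n = k
--     k2 = k
--     while k2:
--         rest = k2 & (k2 - 1)      # clear the lowest set bit
--         lsb = k2 - rest           # that bit's value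
--         yield n & (2 * lsb - 1)   # suffix of n up to and including that bit
--         k2 = rest
-- ===== Notes on version B (the rewrite author's own statement) =====
-- stated objective: alternative
-- what changed: B replaces A's per-bit scan with a running suffix/pow2 accumulator by a set-bit traversal using bit tricks: each iteration clears the lowest set bit with k2 & (k2-1) and recovers the yielded value directly as n & (2*lsb - 1), so zero bits cost no yield logic and no accumulator is kept.
import Mathlib
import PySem

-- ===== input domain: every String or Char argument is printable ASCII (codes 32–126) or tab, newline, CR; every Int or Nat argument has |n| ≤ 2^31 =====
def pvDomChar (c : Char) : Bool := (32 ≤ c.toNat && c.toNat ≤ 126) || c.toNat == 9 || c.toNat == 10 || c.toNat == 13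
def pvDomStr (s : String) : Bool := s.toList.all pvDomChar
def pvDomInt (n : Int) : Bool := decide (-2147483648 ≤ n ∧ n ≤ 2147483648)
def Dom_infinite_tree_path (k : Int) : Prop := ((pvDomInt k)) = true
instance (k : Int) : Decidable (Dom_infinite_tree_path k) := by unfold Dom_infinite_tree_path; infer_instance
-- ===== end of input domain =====

-- B traverses only the set bits of k with bit tricks (clear lowest set bit, mask n directly)
-- instead of A's per-bit scan with a suffix/pow2 accumulator; same values, no speed claim.
-- The generator is ported as the list of yielded values. On k < 0 both Pythons loop forever,
-- so Pre_ restricts to 0 ≤ k; the `≤ 0` guards below only totalize that diverging region.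

-- ===== PORT A =====
-- while k: bit = k % 2; suffix += pow2*bit; if bit: yield suffix; k //= 2; pow2 *= 2
def pathLoopA (k suffix pow2 : Int) : List Int :=
  if h : k ≤ 0 then []           -- Python exits at k = 0; diverges for k < 0 (outside Pre_)
  else
    let bit := PySem.Int.mod k 2
    let suffix' := suffix + pow2 * bit
    (if bit ≠ 0 then [suffix'] else []) ++ pathLoopA (PySem.Int.floordiv k 2) suffix' (pow2 * 2)
termination_by k.toNat
decreasing_by
  have hd : Int.fdiv k 2 = k / 2 := by
    rw [Int.fdiv_eq_ediv]
    simp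
  simp only [PySem.Int.floordiv, hd]
  omega

def infinite_tree_path (k : Int) : List Int :=
  0 :: pathLoopA k 0 1

-- ===== PORT B =====
-- while k2: rest = k2 & (k2-1); lsb = k2 - rest; yield n & (2*lsb - 1); k2 = rest
def pathLoopB (n k2 : Int) : List Int :=
  if h : k2 ≤ 0 then []          -- Python exits at k2 = 0; diverges for k2 < 0 (outside Pre_)
  else
    let rest := PySem.Int.band k2 (k2 - 1)
    let lsb := k2 - rest
    PySem.Int.band n (2 * lsb - 1) :: pathLoopB n rest
termination_by k2.toNat
decreasing_by
  have h1 : PySem.Int.band k2 (k2 - 1) = ((k2.toNat &&& (k2 - 1).toNat : Nat) : Int) :=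
    PySem.Int.band_of_nonneg (by omega) (by omega)
  have h2 : k2.toNat &&& (k2 - 1).toNat ≤ (k2 - 1).toNat := Nat.and_le_right
  omega

def infinite_tree_path_alt (k : Int) : List Int :=
  0 :: pathLoopB k k

-- ===== PRECONDITION & SPEC =====
-- Pre_ excludes k < 0, on which the Python A (and B) never terminates.
def Pre_infinite_tree_path (k : Int) : Prop := 0 ≤ k
instance (k : Int) : Decidable (Pre_infinite_tree_path k) := by unfold Pre_infinite_tree_path; infer_instance
def pvWitness_infinite_tree_path : Int := (6)

def Spec_infinite_tree_path (k : Int) (out : List Int) : Prop := out = infinite_tree_path_alt k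
instance (k : Int) (out : List Int) : Decidable (Spec_infinite_tree_path k out) := by unfold Spec_infinite_tree_path; infer_instance

-- ===== CLAIM =====
def Claim_equal_infinite_tree_path : Prop := ∀ (k : Int), Dom_infinite_tree_path k → Pre_infinite_tree_path k → Spec_infinite_tree_path k (infinite_tree_path k)

-- ===== LEMMAS AND PROOFS =====

-- clearing the lowest set bit: (2^t*(2j+1)) &&& (2^t*(2j+1) - 1) = 2^(t+1)*j
lemma land_pred_clears_lsb : ∀ (t j : Nat), (2^t*(2*j+1)) &&& (2^t*(2*j+1) - 1) = 2^(t+1)*j := by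
  intro t
  induction t with
  | zero =>
    intro j
    have hb : (2*j+1) &&& (2*j) = Nat.bit true j &&& Nat.bit false j := by
      simp [Nat.bit]
      try omega
    simp only [pow_zero, one_mul, Nat.add_sub_cancel, hb, Nat.land_bit]
    simp [Nat.bit, Nat.and_self, Nat.mul_comm]
  | succ t ih =>
    intro j
    have hapos : 0 < 2^t*(2*j+1) := by positivity
    have h2 : 2^(t+1)*(2*j+1) - 1 = Nat.bit true (2^t*(2*j+1) - 1) := by
      simp only [Nat.bit, cond]
      have h : 2^(t+1)*(2*j+1) = 2 * (2^t*(2*j+1)) := by ring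
      omega
    have h1 : 2^(t+1)*(2*j+1) = Nat.bit false (2^t*(2*j+1)) := by
      simp only [Nat.bit, cond]
      ring
    rw [h2, h1, Nat.land_bit, ih j]
    simp only [Nat.bit, Bool.false_and, cond]
    ring

-- masking with 2^(t+1) - 1 is mod
lemma band_mask_mod (n : Nat) (t : Nat) :
    PySem.Int.band (n : Int) ((2:Int) * 2^t - 1) = ((n % 2^(t+1) : Nat) : Int) := by
  have hp : (1:Nat) ≤ 2^(t+1) := Nat.one_le_two_pow
  have h : ((2:Int) * 2^t - 1) = (((2^(t+1) - 1 : Nat) : Int)) := by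
    push_cast [hp]
    push_cast [pow_succ]
    ring
  rw [h, PySem.Int.band_natCast, Nat.and_two_pow_sub_one_eq_mod]

-- the main invariant: A's state (k = m, suffix, pow2 = 2^t) corresponds to B's state
-- (n = suffix + 2^t*m fixed, k2 = 2^t*m), provided 0 ≤ suffix < 2^t.
lemma loopA_eq_loopB : ∀ (m t : Nat) (suffix : Int), 0 ≤ suffix → suffix < 2^t →
    pathLoopA (m : Int) suffix ((2:Int)^t) =
      pathLoopB (suffix + (2:Int)^t * m) ((2:Int)^t * m) := by
  intro m
  induction m using Nat.strong_induction_on with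
  | _ m ih =>
    intro t suffix h0 hlt
    by_cases hm : m = 0
    · subst hm
      rw [pathLoopA.eq_def, pathLoopB.eq_def]
      simp
    · -- m > 0
      have hmpos : 0 < m := Nat.pos_of_ne_zero hm
      rw [pathLoopA.eq_def]
      have hknot : ¬ ((m : Int) ≤ 0) := by exact_mod_cast not_le.mpr (by exact_mod_cast hmpos)
      simp only [hknot, dite_false]
      have hmod : PySem.Int.mod (m : Int) 2 = ((m % 2 : Nat) : Int) := by
        simp [PySem.Int.mod, Int.fmod_eq_emod]
      have hdiv : PySem.Int.floordiv (m : Int) 2 = ((m / 2 : Nat) : Int) := by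
        simp [PySem.Int.floordiv, Int.fdiv_eq_ediv]
      have hpow : ((2:Int)^t * 2) = (2:Int)^(t+1) := by ring
      rcases Nat.even_or_odd m with he | ho
      · -- even: bit = 0, no yield
        obtain ⟨j, hj⟩ := he
        have hj2 : m = 2 * j := by omega
        have hmod0 : (m : Nat) % 2 = 0 := by omega
        have hdv : m / 2 = j := by omega
        rw [hmod, hdiv, hmod0, hdv]
        simp only [Nat.cast_zero, mul_zero, add_zero, ne_eq, not_true_eq_false,
          ite_false, List.nil_append]
        have hjlt : j < m := by omega
        have hlt' : suffix < 2^(t+1) := by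
          refine lt_of_lt_of_le hlt ?_
          exact pow_le_pow_right₀ (by norm_num) (by omega)
        have := ih j hjlt (t + 1) suffix h0 hlt'
        rw [hpow, this]
        have harg : (2:Int)^(t+1) * (j:Int) = (2:Int)^t * (m:Int) := by
          rw [hj2]
          push_cast [pow_succ]
          ring
        rw [harg]
      · -- odd: bit = 1, yield suffix + 2^t
        obtain ⟨j, hj⟩ := ho
        have hmod1 : (m : Nat) % 2 = 1 := by omega
        have hdv : m / 2 = j := by omega
        rw [hmod, hdiv, hmod1, hdv]
        simp only [Nat.cast_one, mul_one, ne_eq, one_ne_zero, not_false_eq_true, ite_true,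
          List.singleton_append]
        have hjlt : j < m := by omega
        have hpt : (0:Int) < 2^t := by positivity
        have ihj := ih j hjlt (t + 1) (suffix + 2^t) (by omega)
          (by rw [pow_succ]; omega)
        -- now unfold one step of B on k2 = 2^t * m  (RHS only; the IH rewrite comes after)
        conv_rhs => rw [pathLoopB.eq_def]
        have hk2 : (2:Int)^t * m = ((2^t * (2*j+1) : Nat) : Int) := by
          rw [hj]
          push_cast
          ring
        have hk2pos : ¬ ((2:Int)^t * (m:Int) ≤ 0) :=
          not_le.mpr (mul_pos hpt (by exact_mod_cast hmpos))
        simp only [hk2pos, dite_false]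
        have hone : (1:Nat) ≤ 2^t * (2*j+1) := Nat.one_le_iff_ne_zero.mpr (by positivity)
        have hrest : PySem.Int.band ((2:Int)^t * m) ((2:Int)^t * m - 1)
            = ((2^(t+1) * j : Nat) : Int) := by
          rw [hk2, show ((2^t * (2*j+1) : Nat) : Int) - 1 = ((2^t * (2*j+1) - 1 : Nat) : Int) by
            push_cast [hone]
            ring]
          rw [PySem.Int.band_natCast, land_pred_clears_lsb]
        rw [hrest]
        have hlsb : (2:Int)^t * (m:Int) - ((2^(t+1) * j : Nat) : Int) = (2:Int)^t := by
          push_cast [pow_succ]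
          rw [hj]
          push_cast
          ring
        rw [hlsb, hpow, ihj]
        have hts : (((suffix + 2^t).toNat : Nat) : Int) = suffix + 2^t :=
          Int.toNat_of_nonneg (by omega)
        have hn : suffix + (2:Int)^t * (m:Int)
            = (((suffix + 2^t).toNat + 2^(t+1) * j : Nat) : Int) := by
          push_cast [hts, pow_succ]
          rw [hj]
          push_cast
          ring
        simp only [List.cons.injEq]
        constructor
        · -- heads agree: n & (2*2^t - 1) = suffix + 2^t
          rw [hn, band_mask_mod]
          have hc : ((2^(t+1) : Nat) : Int) = 2 * (2:Int)^t := by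
            push_cast [pow_succ]
            ring
          have hs : (suffix + 2^t).toNat < 2^(t+1) := by omega
          rw [Nat.add_mul_mod_self_left, Nat.mod_eq_of_lt hs]
          exact hts.symm
        · -- tails agree
          congr 1
          rw [hn]
          push_cast [hts, pow_succ]
          ring

-- ===== VERDICT =====
theorem infinite_tree_path_spec : Claim_equal_infinite_tree_path := by
  intro k _ hpre
  have h0 : (0:Int) ≤ k := hpre
  unfold Spec_infinite_tree_path infinite_tree_path infinite_tree_path_alt
  have hk : k = ((k.toNat : Nat) : Int) := by omega
  rw [hk]
  have := loopA_eq_loopB k.toNat 0 0 le_rfl (by norm_num)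
  simpa using this
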